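-- pv_equiv track=rewrite | github.com/slawa19/GEOv0 | app/core/simulator/viz_rules.py | collect_magnitudes
-- ===== SOURCE A (Python) =====
-- from typing import Iterable
--
-- def collect_magnitudes(atoms_by_id: Iterable[int]) -> tuple[list[int], list[int]]:
--     mags: list[int] = []
--     debt_mags: list[int] = []
--     for atoms in atoms_by_id:
--         mag = abs(int(atoms))
--         mags.append(mag)
--         if atoms < 0:
--             debt_mags.append(mag)
--     return sorted(mags), sorted(debt_mags)
-- ===== SOURCE B (Python) =====
-- from typing import Iterable
--
-- def collect_magnitudes(atoms_by_id: Iterable[int]) -> tuple[list[int], list[int]]: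
--     ordered = sorted(atoms_by_id, key=lambda a: abs(int(a)))
--     mags = [abs(int(a)) for a in ordered]
--     debt_mags = [abs(int(a)) for a in ordered if a < 0]
--     return mags, debt_mags
-- ===== Notes on version B (the rewrite author's own statement) =====
-- stated objective: alternative
-- what changed: Instead of two separate sorts of independently accumulated lists, B sorts the input once by magnitude and obtains both outputs as projections (map abs; filter negatives then map abs) of that single ordered list, the debt sublist emerging already sorted.
import Mathlib
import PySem

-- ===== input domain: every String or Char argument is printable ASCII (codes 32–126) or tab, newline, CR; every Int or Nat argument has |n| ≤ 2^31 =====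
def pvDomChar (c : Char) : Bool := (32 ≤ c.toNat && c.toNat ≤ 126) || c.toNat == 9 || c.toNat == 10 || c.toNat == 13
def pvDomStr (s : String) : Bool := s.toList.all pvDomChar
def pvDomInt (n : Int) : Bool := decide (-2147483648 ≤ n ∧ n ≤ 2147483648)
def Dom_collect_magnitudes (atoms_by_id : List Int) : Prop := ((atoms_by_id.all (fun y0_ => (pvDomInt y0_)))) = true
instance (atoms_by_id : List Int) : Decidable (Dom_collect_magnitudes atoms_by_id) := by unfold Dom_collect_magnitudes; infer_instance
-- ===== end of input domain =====

-- B sorts the input once by magnitude and projects both result lists from it; same value as A, no speed claim.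
-- ===== PORT A =====
def collect_magnitudes (atoms_by_id : List Int) : List Int × List Int :=
  let st := atoms_by_id.foldl
    (fun (st : List Int × List Int) atoms =>
      let mag := |atoms|
      (st.1 ++ [mag], if atoms < 0 then st.2 ++ [mag] else st.2))
    ([], [])
  (PySem.List.sorted st.1 (fun x => x) false, PySem.List.sorted st.2 (fun x => x) false)

-- ===== PORT B =====
def collect_magnitudes_alt (atoms_by_id : List Int) : List Int × List Int :=
  let ordered := PySem.List.sorted atoms_by_id (fun a => |a|) false
  let mags := ordered.map (fun a => |a|)
  let debt_mags := (ordered.filter (fun a => decide (a < 0))).map (fun a => |a|)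
  (mags, debt_mags)

-- ===== PRECONDITION & SPEC =====
def Spec_collect_magnitudes (atoms_by_id : List Int) (out : List Int × List Int) : Prop := out = collect_magnitudes_alt atoms_by_id
instance (atoms_by_id : List Int) (out : List Int × List Int) : Decidable (Spec_collect_magnitudes atoms_by_id out) := by unfold Spec_collect_magnitudes; infer_instance

-- ===== CLAIM (what is proved, stated in full; the proofs are below) =====
def Claim_equal_collect_magnitudes : Prop := ∀ (atoms_by_id : List Int), Dom_collect_magnitudes atoms_by_id → Spec_collect_magnitudes atoms_by_id (collect_magnitudes atoms_by_id)

-- ===== LEMMAS AND PROOFS =====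

-- A's foldl accumulators are a map and a filter-map of the input.
lemma foldl_state (xs : List Int) (m d : List Int) :
    xs.foldl (fun (st : List Int × List Int) atoms =>
      let mag := |atoms|
      (st.1 ++ [mag], if atoms < 0 then st.2 ++ [mag] else st.2)) (m, d)
    = (m ++ xs.map (fun a => |a|),
       d ++ (xs.filter (fun a => decide (a < 0))).map (fun a => |a|)) := by
  induction xs generalizing m d with
  | nil => simp
  | cons x xs ih =>
      simp only [List.foldl_cons, List.map_cons, List.filter_cons]
      by_cases hx : x < 0 <;> simp [hx, ih]

-- mapping by the sort key of a stably-sorted list names the sorted list of the mapped values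
lemma map_abs_sorted (xs : List Int) :
    PySem.List.sorted (xs.map (fun a => |a|)) (fun x => x) false
      = (PySem.List.sorted xs (fun a => |a|) false).map (fun a => |a|) := by
  refine PySem.List.sorted_id_eq_of_perm_of_pairwise _ _
    (List.Perm.map _ (PySem.List.sorted_perm xs _ false)) ?_
  exact PySem.List.sorted_map_key_pairwise xs _

lemma map_abs_filter_sorted (xs : List Int) :
    PySem.List.sorted ((xs.filter (fun a => decide (a < 0))).map (fun a => |a|)) (fun x => x) false
      = ((PySem.List.sorted xs (fun a => |a|) false).filter (fun a => decide (a < 0))).map (fun a => |a|) := by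
  refine PySem.List.sorted_id_eq_of_perm_of_pairwise _ _
    (List.Perm.map _ (List.Perm.filter _ (PySem.List.sorted_perm xs _ false))) ?_
  have hsub : List.Sublist
      (((PySem.List.sorted xs (fun a => |a|) false).filter (fun a => decide (a < 0))).map (fun a => |a|))
      ((PySem.List.sorted xs (fun a => |a|) false).map (fun a => |a|)) :=
    List.Sublist.map _ List.filter_sublist
  exact (PySem.List.sorted_map_key_pairwise xs _).sublist hsub

-- ===== VERDICT (by name: the statement is the Claim_ definition above) =====
theorem collect_magnitudes_spec : Claim_equal_collect_magnitudes := by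
  intro xs _
  unfold Spec_collect_magnitudes collect_magnitudes collect_magnitudes_alt
  simp only [foldl_state, List.nil_append]
  rw [map_abs_sorted, map_abs_filter_sorted]
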